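-- pv_equiv track=rewrite | github.com/cmoh1981/hbam-organoid | src/hbam/modality/functional.py | _categorize_genes
-- ===== SOURCE A (Python) =====
-- def _categorize_genes(gene_names: list[str]) -> list[str]:
--     """Simple functional categorization based on gene name patterns."""
--     categories = {
--         "muscle": ["MYH", "MYL", "ACTA", "TTN", "DES", "MYOD", "MYF", "PAX7", "CKM", "MB"],
--         "inflammatory": ["IL", "TNF", "NFKB", "CXCL", "CCL", "STAT3", "JAK"],
--         "metabolic": ["AMPK", "MTOR", "AKT", "IGF", "INS", "GLUT", "PPARG"],
--         "senescence": ["CDKN", "TP53", "RB1", "TERT", "SIRT"],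
--         "ecm": ["COL", "FN1", "LAMA", "MMP", "TIMP"],
--     }
--
--     result = []
--     for gene in gene_names:
--         gene_upper = gene.upper()
--         assigned = "other"
--         for cat, prefixes in categories.items():
--             if any(gene_upper.startswith(p) for p in prefixes):
--                 assigned = cat
--                 break
--         result.append(assigned)
--
--     return result
-- ===== SOURCE B (Python) =====
-- def _categorize_genes(gene_names: list[str]) -> list[str]:
--     """Prefix-table lookup: one dict indexed by prefix, probed at each prefix length."""
--     categories = {
--         "muscle": ["MYH", "MYL", "ACTA", "TTN", "DES", "MYOD", "MYF", "PAX7", "CKM", "MB"],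
--         "inflammatory": ["IL", "TNF", "NFKB", "CXCL", "CCL", "STAT3", "JAK"],
--         "metabolic": ["AMPK", "MTOR", "AKT", "IGF", "INS", "GLUT", "PPARG"],
--         "senescence": ["CDKN", "TP53", "RB1", "TERT", "SIRT"],
--         "ecm": ["COL", "FN1", "LAMA", "MMP", "TIMP"],
--     }
--     # No prefix is a prefix of another, so at most one length can hit and
--     # category priority order is irrelevant: a flat hash table suffices.
--     table = {p: cat for cat, prefixes in categories.items() for p in prefixes}
--     lengths = sorted({len(p) for p in table})
--
--     def lookup(gene: str) -> str:
--         u = gene.upper()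
--         for k in lengths:
--             hit = table.get(u[:k])
--             if hit is not None:
--                 return hit
--         return "other"
--
--     return [lookup(g) for g in gene_names]
-- ===== Notes on version B (the rewrite author's own statement) =====
-- stated objective: faster
-- what changed: Replaces A's per-gene scan over five category prefix lists (34 startswith tests) by a single prefix->category dictionary built once and probed with u[:k] for each of the four distinct prefix lengths, valid because no prefix is a prefix of another.
import Mathlib
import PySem

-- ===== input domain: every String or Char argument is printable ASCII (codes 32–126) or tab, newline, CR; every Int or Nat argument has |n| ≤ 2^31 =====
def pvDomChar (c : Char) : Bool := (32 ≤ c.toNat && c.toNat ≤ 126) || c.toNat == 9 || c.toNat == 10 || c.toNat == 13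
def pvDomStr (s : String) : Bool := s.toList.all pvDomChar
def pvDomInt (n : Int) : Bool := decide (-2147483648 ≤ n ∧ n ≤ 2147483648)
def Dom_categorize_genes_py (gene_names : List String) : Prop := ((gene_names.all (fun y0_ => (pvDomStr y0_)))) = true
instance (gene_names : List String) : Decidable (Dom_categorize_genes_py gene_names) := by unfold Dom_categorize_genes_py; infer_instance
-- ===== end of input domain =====

-- B replaces A's per-gene scan over the five category prefix lists by one prefix-indexed
-- dictionary probed once per prefix length (the real change: a hash index removes the inner scan).
set_option maxRecDepth 4000
set_option maxHeartbeats 4000000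

-- ===== PORT A =====
-- the categories dict literal of A (insertion order)
def pvCategories : List (String × List String) :=
  [("muscle", ["MYH", "MYL", "ACTA", "TTN", "DES", "MYOD", "MYF", "PAX7", "CKM", "MB"]),
   ("inflammatory", ["IL", "TNF", "NFKB", "CXCL", "CCL", "STAT3", "JAK"]),
   ("metabolic", ["AMPK", "MTOR", "AKT", "IGF", "INS", "GLUT", "PPARG"]),
   ("senescence", ["CDKN", "TP53", "RB1", "TERT", "SIRT"]),
   ("ecm", ["COL", "FN1", "LAMA", "MMP", "TIMP"])]

-- A's inner 'for cat, prefixes in categories.items(): if any(...): assigned = cat; break'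
def pvLoopA : String → List (String × List String) → String
  | _, [] => "other"
  | u, cp :: rest =>
      if cp.2.any (fun p => PySem.Str.startswith u p) then cp.1 else pvLoopA u rest

def categorize_genes_py (gene_names : List String) : List String :=
  gene_names.foldl (fun result gene => result ++ [pvLoopA (PySem.Str.upper gene) pvCategories]) []

-- ===== PORT B =====
-- B's table = {p: cat for cat, prefixes in categories.items() for p in prefixes}
def pvTable : PySem.Dict String String :=
  pvCategories.foldl (fun d cp => cp.2.foldl (fun d p => d.insert p cp.1) d) PySem.Dict.empty

-- B's lengths = sorted({len(p) for p in table})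
def pvLengths : List Int :=
  PySem.List.sorted (PySem.Set.ofList (pvTable.keys.map (fun p => PySem.Str.len p))) (fun k => k)

-- B's 'for k in lengths: hit = table.get(u[:k]); if hit is not None: return hit'
def pvLoopB : String → List Int → String
  | _, [] => "other"
  | u, k :: rest =>
      match pvTable.get? (PySem.Str.slice u none (some k)) with
      | some hit => hit
      | none => pvLoopB u rest

def categorize_genes_py_alt (gene_names : List String) : List String :=
  gene_names.map (fun gene => pvLoopB (PySem.Str.upper gene) pvLengths)

-- ===== PRECONDITION & SPEC =====
def Spec_categorize_genes_py (gene_names : List String) (out : List String) : Prop := out = categorize_genes_py_alt gene_names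
instance (gene_names : List String) (out : List String) : Decidable (Spec_categorize_genes_py gene_names out) := by unfold Spec_categorize_genes_py; infer_instance

-- ===== CLAIM (what is proved, stated in full; the proofs are below) =====
def Claim_equal_categorize_genes_py : Prop := ∀ (gene_names : List String), Dom_categorize_genes_py gene_names → Spec_categorize_genes_py gene_names (categorize_genes_py gene_names)

-- ===== LEMMAS AND PROOFS =====
lemma pv_str_beq_eq (s t : String) : (s == t) = decide (t.toList = s.toList) := by
  by_cases hst : s = t
  · subst hst; simp
  · have h2 : ¬ (t.toList = s.toList) := fun h => hst (String.toList_inj.mp h.symm)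
    simp [beq_eq_false_iff_ne, hst, h2]

lemma pv_get?_mk_nil {κ ν : Type} [BEq κ] (x : κ) :
    (PySem.Dict.mk ([] : List (κ × ν))).get? x = none := rfl

-- the per-gene equivalence: A's prioritised prefix scan = B's per-length table probes
lemma pv_loop_eq (u : String) : pvLoopA u pvCategories = pvLoopB u pvLengths := by
  have hL : pvLengths = [2,3,4,5] := by decide
  have hT : pvTable = PySem.Dict.mk
    [("MYH","muscle"),
     ("MYL","muscle"),
     ("ACTA","muscle"),
     ("TTN","muscle"),
     ("DES","muscle"),
     ("MYOD","muscle"),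
     ("MYF","muscle"),
     ("PAX7","muscle"),
     ("CKM","muscle"),
     ("MB","muscle"),
     ("IL","inflammatory"),
     ("TNF","inflammatory"),
     ("NFKB","inflammatory"),
     ("CXCL","inflammatory"),
     ("CCL","inflammatory"),
     ("STAT3","inflammatory"),
     ("JAK","inflammatory"),
     ("AMPK","metabolic"),
     ("MTOR","metabolic"),
     ("AKT","metabolic"),
     ("IGF","metabolic"),
     ("INS","metabolic"),
     ("GLUT","metabolic"),
     ("PPARG","metabolic"),
     ("CDKN","senescence"),
     ("TP53","senescence"),
     ("RB1","senescence"),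
     ("TERT","senescence"),
     ("SIRT","senescence"),
     ("COL","ecm"),
     ("FN1","ecm"),
     ("LAMA","ecm"),
     ("MMP","ecm"),
     ("TIMP","ecm")] := by decide
  rcases hl : u.toList with _ | ⟨a, _ | ⟨b, _ | ⟨c, _ | ⟨d, _ | ⟨e, rest⟩⟩⟩⟩⟩
  · simp only [pvCategories, hL, hT, pvLoopA, pvLoopB, PySem.Str.startswith_eq,
        PySem.Str.toList_slice, PySem.Chars.slice_eq_listSlice, PySem.List.slice_to,
        PySem.Dict.get?_mk_cons, pv_get?_mk_nil, List.any_cons, List.any_nil, hl, pv_str_beq_eq]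
    clear hT hL
    simp [PySem.Chars.startswith_iff, List.cons_prefix_iff, List.take_succ_cons,
          List.take_zero, List.take_nil, PySem.List.slice_to]
  · simp only [pvCategories, hL, hT, pvLoopA, pvLoopB, PySem.Str.startswith_eq,
        PySem.Str.toList_slice, PySem.Chars.slice_eq_listSlice, PySem.List.slice_to,
        PySem.Dict.get?_mk_cons, pv_get?_mk_nil, List.any_cons, List.any_nil, hl, pv_str_beq_eq]
    clear hT hL
    simp [PySem.Chars.startswith_iff, List.cons_prefix_iff, List.take_succ_cons,
          List.take_zero, List.take_nil, PySem.List.slice_to]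
  · simp only [pvCategories, hL, hT, pvLoopA, pvLoopB, PySem.Str.startswith_eq,
        PySem.Str.toList_slice, PySem.Chars.slice_eq_listSlice, PySem.List.slice_to,
        PySem.Dict.get?_mk_cons, pv_get?_mk_nil, List.any_cons, List.any_nil, hl, pv_str_beq_eq]
    clear hT hL
    simp [PySem.Chars.startswith_iff, List.cons_prefix_iff, List.take_succ_cons,
          List.take_zero, List.take_nil, PySem.List.slice_to]
    by_cases h1 : a = 'M' ∧ b = 'B'
    · simp [h1]
    by_cases h2 : a = 'I' ∧ b = 'L'
    · simp [h1, h2]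
    simp [h1, h2]
  · simp only [pvCategories, hL, hT, pvLoopA, pvLoopB, PySem.Str.startswith_eq,
        PySem.Str.toList_slice, PySem.Chars.slice_eq_listSlice, PySem.List.slice_to,
        PySem.Dict.get?_mk_cons, pv_get?_mk_nil, List.any_cons, List.any_nil, hl, pv_str_beq_eq]
    clear hT hL
    simp [PySem.Chars.startswith_iff, List.cons_prefix_iff, List.take_succ_cons,
          List.take_zero, List.take_nil, PySem.List.slice_to]
    by_cases h1 : a = 'M' ∧ b = 'Y' ∧ c = 'H'
    · simp [h1]
    by_cases h2 : a = 'M' ∧ b = 'Y' ∧ c = 'L'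
    · simp [h1, h2]
    by_cases h3 : a = 'T' ∧ b = 'T' ∧ c = 'N'
    · simp [h1, h2, h3]
    by_cases h4 : a = 'D' ∧ b = 'E' ∧ c = 'S'
    · simp [h1, h2, h3, h4]
    by_cases h5 : a = 'M' ∧ b = 'Y' ∧ c = 'F'
    · simp [h1, h2, h3, h4, h5]
    by_cases h6 : a = 'C' ∧ b = 'K' ∧ c = 'M'
    · simp [h1, h2, h3, h4, h5, h6]
    by_cases h7 : a = 'M' ∧ b = 'B'
    · simp [h1, h2, h3, h4, h5, h6, h7]
    by_cases h8 : a = 'I' ∧ b = 'L'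
    · simp [h1, h2, h3, h4, h5, h6, h7, h8]
    by_cases h9 : a = 'T' ∧ b = 'N' ∧ c = 'F'
    · simp [h1, h2, h3, h4, h5, h6, h7, h8, h9]
    by_cases h10 : a = 'C' ∧ b = 'C' ∧ c = 'L'
    · simp [h1, h2, h3, h4, h5, h6, h7, h8, h9, h10]
    by_cases h11 : a = 'J' ∧ b = 'A' ∧ c = 'K'
    · simp [h1, h2, h3, h4, h5, h6, h7, h8, h9, h10, h11]
    by_cases h12 : a = 'A' ∧ b = 'K' ∧ c = 'T'
    · simp [h1, h2, h3, h4, h5, h6, h7, h8, h9, h10, h11, h12]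
    by_cases h13 : a = 'I' ∧ b = 'G' ∧ c = 'F'
    · simp [h1, h2, h3, h4, h5, h6, h7, h8, h9, h10, h11, h12, h13]
    by_cases h14 : a = 'I' ∧ b = 'N' ∧ c = 'S'
    · simp [h1, h2, h3, h4, h5, h6, h7, h8, h9, h10, h11, h12, h13, h14]
    by_cases h15 : a = 'R' ∧ b = 'B' ∧ c = '1'
    · simp [h1, h2, h3, h4, h5, h6, h7, h8, h9, h10, h11, h12, h13, h14, h15]
    by_cases h16 : a = 'C' ∧ b = 'O' ∧ c = 'L'
    · simp [h1, h2, h3, h4, h5, h6, h7, h8, h9, h10, h11, h12, h13, h14, h15, h16]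
    by_cases h17 : a = 'F' ∧ b = 'N' ∧ c = '1'
    · simp [h1, h2, h3, h4, h5, h6, h7, h8, h9, h10, h11, h12, h13, h14, h15, h16, h17]
    by_cases h18 : a = 'M' ∧ b = 'M' ∧ c = 'P'
    · simp [h1, h2, h3, h4, h5, h6, h7, h8, h9, h10, h11, h12, h13, h14, h15, h16, h17, h18]
    simp [h1, h2, h3, h4, h5, h6, h7, h8, h9, h10, h11, h12, h13, h14, h15, h16, h17, h18]
  · simp only [pvCategories, hL, hT, pvLoopA, pvLoopB, PySem.Str.startswith_eq,
        PySem.Str.toList_slice, PySem.Chars.slice_eq_listSlice, PySem.List.slice_to,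
        PySem.Dict.get?_mk_cons, pv_get?_mk_nil, List.any_cons, List.any_nil, hl, pv_str_beq_eq]
    clear hT hL
    simp [PySem.Chars.startswith_iff, List.cons_prefix_iff, List.take_succ_cons,
          List.take_zero, List.take_nil, PySem.List.slice_to]
    by_cases h1 : a = 'M' ∧ b = 'Y' ∧ c = 'H'
    · simp [h1]
    by_cases h2 : a = 'M' ∧ b = 'Y' ∧ c = 'L'
    · simp [h1, h2]
    by_cases h3 : a = 'A' ∧ b = 'C' ∧ c = 'T' ∧ d = 'A'
    · simp [h1, h2, h3]
    by_cases h4 : a = 'T' ∧ b = 'T' ∧ c = 'N'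
    · simp [h1, h2, h3, h4]
    by_cases h5 : a = 'D' ∧ b = 'E' ∧ c = 'S'
    · simp [h1, h2, h3, h4, h5]
    by_cases h6 : a = 'M' ∧ b = 'Y' ∧ c = 'O' ∧ d = 'D'
    · simp [h1, h2, h3, h4, h5, h6]
    by_cases h7 : a = 'M' ∧ b = 'Y' ∧ c = 'F'
    · simp [h1, h2, h3, h4, h5, h6, h7]
    by_cases h8 : a = 'P' ∧ b = 'A' ∧ c = 'X' ∧ d = '7'
    · simp [h1, h2, h3, h4, h5, h6, h7, h8]
    by_cases h9 : a = 'C' ∧ b = 'K' ∧ c = 'M'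
    · simp [h1, h2, h3, h4, h5, h6, h7, h8, h9]
    by_cases h10 : a = 'M' ∧ b = 'B'
    · simp [h1, h2, h3, h4, h5, h6, h7, h8, h9, h10]
    by_cases h11 : a = 'I' ∧ b = 'L'
    · simp [h1, h2, h3, h4, h5, h6, h7, h8, h9, h10, h11]
    by_cases h12 : a = 'T' ∧ b = 'N' ∧ c = 'F'
    · simp [h1, h2, h3, h4, h5, h6, h7, h8, h9, h10, h11, h12]
    by_cases h13 : a = 'N' ∧ b = 'F' ∧ c = 'K' ∧ d = 'B'
    · simp [h1, h2, h3, h4, h5, h6, h7, h8, h9, h10, h11, h12, h13]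
    by_cases h14 : a = 'C' ∧ b = 'X' ∧ c = 'C' ∧ d = 'L'
    · simp [h1, h2, h3, h4, h5, h6, h7, h8, h9, h10, h11, h12, h13, h14]
    by_cases h15 : a = 'C' ∧ b = 'C' ∧ c = 'L'
    · simp [h1, h2, h3, h4, h5, h6, h7, h8, h9, h10, h11, h12, h13, h14, h15]
    by_cases h16 : a = 'J' ∧ b = 'A' ∧ c = 'K'
    · simp [h1, h2, h3, h4, h5, h6, h7, h8, h9, h10, h11, h12, h13, h14, h15, h16]
    by_cases h17 : a = 'A' ∧ b = 'M' ∧ c = 'P' ∧ d = 'K'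
    · simp [h1, h2, h3, h4, h5, h6, h7, h8, h9, h10, h11, h12, h13, h14, h15, h16, h17]
    by_cases h18 : a = 'M' ∧ b = 'T' ∧ c = 'O' ∧ d = 'R'
    · simp [h1, h2, h3, h4, h5, h6, h7, h8, h9, h10, h11, h12, h13, h14, h15, h16, h17, h18]
    by_cases h19 : a = 'A' ∧ b = 'K' ∧ c = 'T'
    · simp [h1, h2, h3, h4, h5, h6, h7, h8, h9, h10, h11, h12, h13, h14, h15, h16, h17, h18, h19]
    by_cases h20 : a = 'I' ∧ b = 'G' ∧ c = 'F'
    · simp [h1, h2, h3, h4, h5, h6, h7, h8, h9, h10, h11, h12, h13, h14, h15, h16, h17, h18, h19, h20]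
    by_cases h21 : a = 'I' ∧ b = 'N' ∧ c = 'S'
    · simp [h1, h2, h3, h4, h5, h6, h7, h8, h9, h10, h11, h12, h13, h14, h15, h16, h17, h18, h19, h20, h21]
    by_cases h22 : a = 'G' ∧ b = 'L' ∧ c = 'U' ∧ d = 'T'
    · simp [h1, h2, h3, h4, h5, h6, h7, h8, h9, h10, h11, h12, h13, h14, h15, h16, h17, h18, h19, h20, h21, h22]
    by_cases h23 : a = 'C' ∧ b = 'D' ∧ c = 'K' ∧ d = 'N'
    · simp [h1, h2, h3, h4, h5, h6, h7, h8, h9, h10, h11, h12, h13, h14, h15, h16, h17, h18, h19, h20, h21, h22, h23]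
    by_cases h24 : a = 'T' ∧ b = 'P' ∧ c = '5' ∧ d = '3'
    · simp [h1, h2, h3, h4, h5, h6, h7, h8, h9, h10, h11, h12, h13, h14, h15, h16, h17, h18, h19, h20, h21, h22, h23, h24]
    by_cases h25 : a = 'R' ∧ b = 'B' ∧ c = '1'
    · simp [h1, h2, h3, h4, h5, h6, h7, h8, h9, h10, h11, h12, h13, h14, h15, h16, h17, h18, h19, h20, h21, h22, h23, h24, h25]
    by_cases h26 : a = 'T' ∧ b = 'E' ∧ c = 'R' ∧ d = 'T'
    · simp [h1, h2, h3, h4, h5, h6, h7, h8, h9, h10, h11, h12, h13, h14, h15, h16, h17, h18, h19, h20, h21, h22, h23, h24, h25, h26]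
    by_cases h27 : a = 'S' ∧ b = 'I' ∧ c = 'R' ∧ d = 'T'
    · simp [h1, h2, h3, h4, h5, h6, h7, h8, h9, h10, h11, h12, h13, h14, h15, h16, h17, h18, h19, h20, h21, h22, h23, h24, h25, h26, h27]
    by_cases h28 : a = 'C' ∧ b = 'O' ∧ c = 'L'
    · simp [h1, h2, h3, h4, h5, h6, h7, h8, h9, h10, h11, h12, h13, h14, h15, h16, h17, h18, h19, h20, h21, h22, h23, h24, h25, h26, h27, h28]
    by_cases h29 : a = 'F' ∧ b = 'N' ∧ c = '1'
    · simp [h1, h2, h3, h4, h5, h6, h7, h8, h9, h10, h11, h12, h13, h14, h15, h16, h17, h18, h19, h20, h21, h22, h23, h24, h25, h26, h27, h28, h29]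
    by_cases h30 : a = 'L' ∧ b = 'A' ∧ c = 'M' ∧ d = 'A'
    · simp [h1, h2, h3, h4, h5, h6, h7, h8, h9, h10, h11, h12, h13, h14, h15, h16, h17, h18, h19, h20, h21, h22, h23, h24, h25, h26, h27, h28, h29, h30]
    by_cases h31 : a = 'M' ∧ b = 'M' ∧ c = 'P'
    · simp [h1, h2, h3, h4, h5, h6, h7, h8, h9, h10, h11, h12, h13, h14, h15, h16, h17, h18, h19, h20, h21, h22, h23, h24, h25, h26, h27, h28, h29, h30, h31]
    by_cases h32 : a = 'T' ∧ b = 'I' ∧ c = 'M' ∧ d = 'P'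
    · simp [h1, h2, h3, h4, h5, h6, h7, h8, h9, h10, h11, h12, h13, h14, h15, h16, h17, h18, h19, h20, h21, h22, h23, h24, h25, h26, h27, h28, h29, h30, h31, h32]
    simp [h1, h2, h3, h4, h5, h6, h7, h8, h9, h10, h11, h12, h13, h14, h15, h16, h17, h18, h19, h20, h21, h22, h23, h24, h25, h26, h27, h28, h29, h30, h31, h32]
  · simp only [pvCategories, hL, hT, pvLoopA, pvLoopB, PySem.Str.startswith_eq,
        PySem.Str.toList_slice, PySem.Chars.slice_eq_listSlice, PySem.List.slice_to,
        PySem.Dict.get?_mk_cons, pv_get?_mk_nil, List.any_cons, List.any_nil, hl, pv_str_beq_eq]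
    clear hT hL
    simp [PySem.Chars.startswith_iff, List.cons_prefix_iff, List.take_succ_cons,
          List.take_zero, List.take_nil, PySem.List.slice_to]
    by_cases h1 : a = 'M' ∧ b = 'Y' ∧ c = 'H'
    · simp [h1]
    by_cases h2 : a = 'M' ∧ b = 'Y' ∧ c = 'L'
    · simp [h1, h2]
    by_cases h3 : a = 'A' ∧ b = 'C' ∧ c = 'T' ∧ d = 'A'
    · simp [h1, h2, h3]
    by_cases h4 : a = 'T' ∧ b = 'T' ∧ c = 'N'
    · simp [h1, h2, h3, h4]
    by_cases h5 : a = 'D' ∧ b = 'E' ∧ c = 'S'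
    · simp [h1, h2, h3, h4, h5]
    by_cases h6 : a = 'M' ∧ b = 'Y' ∧ c = 'O' ∧ d = 'D'
    · simp [h1, h2, h3, h4, h5, h6]
    by_cases h7 : a = 'M' ∧ b = 'Y' ∧ c = 'F'
    · simp [h1, h2, h3, h4, h5, h6, h7]
    by_cases h8 : a = 'P' ∧ b = 'A' ∧ c = 'X' ∧ d = '7'
    · simp [h1, h2, h3, h4, h5, h6, h7, h8]
    by_cases h9 : a = 'C' ∧ b = 'K' ∧ c = 'M'
    · simp [h1, h2, h3, h4, h5, h6, h7, h8, h9]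
    by_cases h10 : a = 'M' ∧ b = 'B'
    · simp [h1, h2, h3, h4, h5, h6, h7, h8, h9, h10]
    by_cases h11 : a = 'I' ∧ b = 'L'
    · simp [h1, h2, h3, h4, h5, h6, h7, h8, h9, h10, h11]
    by_cases h12 : a = 'T' ∧ b = 'N' ∧ c = 'F'
    · simp [h1, h2, h3, h4, h5, h6, h7, h8, h9, h10, h11, h12]
    by_cases h13 : a = 'N' ∧ b = 'F' ∧ c = 'K' ∧ d = 'B'
    · simp [h1, h2, h3, h4, h5, h6, h7, h8, h9, h10, h11, h12, h13]
    by_cases h14 : a = 'C' ∧ b = 'X' ∧ c = 'C' ∧ d = 'L'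
    · simp [h1, h2, h3, h4, h5, h6, h7, h8, h9, h10, h11, h12, h13, h14]
    by_cases h15 : a = 'C' ∧ b = 'C' ∧ c = 'L'
    · simp [h1, h2, h3, h4, h5, h6, h7, h8, h9, h10, h11, h12, h13, h14, h15]
    by_cases h16 : a = 'S' ∧ b = 'T' ∧ c = 'A' ∧ d = 'T' ∧ e = '3'
    · simp [h1, h2, h3, h4, h5, h6, h7, h8, h9, h10, h11, h12, h13, h14, h15, h16]
    by_cases h17 : a = 'J' ∧ b = 'A' ∧ c = 'K'
    · simp [h1, h2, h3, h4, h5, h6, h7, h8, h9, h10, h11, h12, h13, h14, h15, h16, h17]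
    by_cases h18 : a = 'A' ∧ b = 'M' ∧ c = 'P' ∧ d = 'K'
    · simp [h1, h2, h3, h4, h5, h6, h7, h8, h9, h10, h11, h12, h13, h14, h15, h16, h17, h18]
    by_cases h19 : a = 'M' ∧ b = 'T' ∧ c = 'O' ∧ d = 'R'
    · simp [h1, h2, h3, h4, h5, h6, h7, h8, h9, h10, h11, h12, h13, h14, h15, h16, h17, h18, h19]
    by_cases h20 : a = 'A' ∧ b = 'K' ∧ c = 'T'
    · simp [h1, h2, h3, h4, h5, h6, h7, h8, h9, h10, h11, h12, h13, h14, h15, h16, h17, h18, h19, h20]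
    by_cases h21 : a = 'I' ∧ b = 'G' ∧ c = 'F'
    · simp [h1, h2, h3, h4, h5, h6, h7, h8, h9, h10, h11, h12, h13, h14, h15, h16, h17, h18, h19, h20, h21]
    by_cases h22 : a = 'I' ∧ b = 'N' ∧ c = 'S'
    · simp [h1, h2, h3, h4, h5, h6, h7, h8, h9, h10, h11, h12, h13, h14, h15, h16, h17, h18, h19, h20, h21, h22]
    by_cases h23 : a = 'G' ∧ b = 'L' ∧ c = 'U' ∧ d = 'T'
    · simp [h1, h2, h3, h4, h5, h6, h7, h8, h9, h10, h11, h12, h13, h14, h15, h16, h17, h18, h19, h20, h21, h22, h23]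
    by_cases h24 : a = 'P' ∧ b = 'P' ∧ c = 'A' ∧ d = 'R' ∧ e = 'G'
    · simp [h1, h2, h3, h4, h5, h6, h7, h8, h9, h10, h11, h12, h13, h14, h15, h16, h17, h18, h19, h20, h21, h22, h23, h24]
    by_cases h25 : a = 'C' ∧ b = 'D' ∧ c = 'K' ∧ d = 'N'
    · simp [h1, h2, h3, h4, h5, h6, h7, h8, h9, h10, h11, h12, h13, h14, h15, h16, h17, h18, h19, h20, h21, h22, h23, h24, h25]
    by_cases h26 : a = 'T' ∧ b = 'P' ∧ c = '5' ∧ d = '3'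
    · simp [h1, h2, h3, h4, h5, h6, h7, h8, h9, h10, h11, h12, h13, h14, h15, h16, h17, h18, h19, h20, h21, h22, h23, h24, h25, h26]
    by_cases h27 : a = 'R' ∧ b = 'B' ∧ c = '1'
    · simp [h1, h2, h3, h4, h5, h6, h7, h8, h9, h10, h11, h12, h13, h14, h15, h16, h17, h18, h19, h20, h21, h22, h23, h24, h25, h26, h27]
    by_cases h28 : a = 'T' ∧ b = 'E' ∧ c = 'R' ∧ d = 'T'
    · simp [h1, h2, h3, h4, h5, h6, h7, h8, h9, h10, h11, h12, h13, h14, h15, h16, h17, h18, h19, h20, h21, h22, h23, h24, h25, h26, h27, h28]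
    by_cases h29 : a = 'S' ∧ b = 'I' ∧ c = 'R' ∧ d = 'T'
    · simp [h1, h2, h3, h4, h5, h6, h7, h8, h9, h10, h11, h12, h13, h14, h15, h16, h17, h18, h19, h20, h21, h22, h23, h24, h25, h26, h27, h28, h29]
    by_cases h30 : a = 'C' ∧ b = 'O' ∧ c = 'L'
    · simp [h1, h2, h3, h4, h5, h6, h7, h8, h9, h10, h11, h12, h13, h14, h15, h16, h17, h18, h19, h20, h21, h22, h23, h24, h25, h26, h27, h28, h29, h30]
    by_cases h31 : a = 'F' ∧ b = 'N' ∧ c = '1'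
    · simp [h1, h2, h3, h4, h5, h6, h7, h8, h9, h10, h11, h12, h13, h14, h15, h16, h17, h18, h19, h20, h21, h22, h23, h24, h25, h26, h27, h28, h29, h30, h31]
    by_cases h32 : a = 'L' ∧ b = 'A' ∧ c = 'M' ∧ d = 'A'
    · simp [h1, h2, h3, h4, h5, h6, h7, h8, h9, h10, h11, h12, h13, h14, h15, h16, h17, h18, h19, h20, h21, h22, h23, h24, h25, h26, h27, h28, h29, h30, h31, h32]
    by_cases h33 : a = 'M' ∧ b = 'M' ∧ c = 'P'
    · simp [h1, h2, h3, h4, h5, h6, h7, h8, h9, h10, h11, h12, h13, h14, h15, h16, h17, h18, h19, h20, h21, h22, h23, h24, h25, h26, h27, h28, h29, h30, h31, h32, h33]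
    by_cases h34 : a = 'T' ∧ b = 'I' ∧ c = 'M' ∧ d = 'P'
    · simp [h1, h2, h3, h4, h5, h6, h7, h8, h9, h10, h11, h12, h13, h14, h15, h16, h17, h18, h19, h20, h21, h22, h23, h24, h25, h26, h27, h28, h29, h30, h31, h32, h33, h34]
    simp [h1, h2, h3, h4, h5, h6, h7, h8, h9, h10, h11, h12, h13, h14, h15, h16, h17, h18, h19, h20, h21, h22, h23, h24, h25, h26, h27, h28, h29, h30, h31, h32, h33, h34]

lemma pv_foldl_append_map (l : List String) (acc : List String) :
    l.foldl (fun r g => r ++ [pvLoopA (PySem.Str.upper g) pvCategories]) acc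
      = acc ++ l.map (fun g => pvLoopA (PySem.Str.upper g) pvCategories) := by
  induction l generalizing acc <;> simp_all

-- ===== VERDICT (by name: the statement is the Claim_ definition above) =====
theorem categorize_genes_py_spec : Claim_equal_categorize_genes_py := by
  intro gene_names _
  unfold Spec_categorize_genes_py categorize_genes_py categorize_genes_py_alt
  rw [pv_foldl_append_map]
  simp only [List.nil_append]
  exact List.map_congr_left (fun g _ => pv_loop_eq (PySem.Str.upper g))
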